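-- pv_equiv track=rewrite | github.com/yixiangchen1995/python-Sigilyph | sigilyph/core/text_process.py | replace_sil2label
-- ===== SOURCE A (Python) =====
-- def replace_sil2label(phones):
--     #phones = ['sil_1' if xx == 'sil_lang' else xx for xx in phones]
--     phones = ['' if xx == 'sil_lang' else xx for xx in phones]
--     phones = ['sil_2' if xx == 'sil_punc' else xx for xx in phones]
--     phones = ['sil_2' if xx == 'sil_end' else xx for xx in phones]
--     phones = ['sil_1' if xx == 'sil' else xx for xx in phones]
--     phones = list(filter(None, phones))
--     #outphones = []
--     outphones = ['sil_1']
--     for ele in phones: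
--         if outphones == []:
--             outphones.append(ele)
--         else:
--             if ele.split('_')[0] == 'sil' and outphones[-1].split('_')[0] == 'sil':
--                 outphones[-1] = 'sil_2'
--                 #outphones[-1] = 'sil_1'
--             else:
--                 outphones.append(ele)
--     #if outphones[-1].split('_')[0] == 'sil':
--     #    outphones = outphones[:-1]
--     return outphones
-- ===== SOURCE B (Python) =====
-- _MAP = {'sil_lang': '', 'sil_punc': 'sil_2', 'sil_end': 'sil_2', 'sil': 'sil_1'}
--
--
-- def _is_sil(t):
--     return t.split('_')[0] == 'sil'
--
--
-- def replace_sil2label(phones):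
--     # Run-length grouping: build the normalized token stream (seeded with the
--     # virtual leading 'sil_1'), then scan maximal runs of silence tokens with
--     # two pointers, emitting ONE label per run: 'sil_2' for a run of length > 1,
--     # otherwise the run's single token; non-silence tokens are copied through.
--     toks = ['sil_1']
--     for p in phones:
--         t = _MAP.get(p, p)
--         if t:
--             toks.append(t)
--     out = []
--     i, n = 0, len(toks)
--     while i < n:
--         if _is_sil(toks[i]):
--             j = i + 1
--             while j < n and _is_sil(toks[j]):
--                 j += 1
--             out.append('sil_2' if j - i > 1 else toks[i])
--             i = j
--         else:
--             out.append(toks[i])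
--             i += 1
--     return out
-- ===== Notes on version B (the rewrite author's own statement) =====
-- stated objective: alternative
-- what changed: Replaced A's accumulator loop that repeatedly rewrites its last element to merge adjacent silences by a run-length-grouping scan: build the normalized token stream once (seeded with the virtual leading 'sil_1'), then a two-pointer pass emits one label per maximal silence run ('sil_2' if the run is longer than 1, else the run's token) and copies non-silence tokens through.
import Mathlib
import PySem

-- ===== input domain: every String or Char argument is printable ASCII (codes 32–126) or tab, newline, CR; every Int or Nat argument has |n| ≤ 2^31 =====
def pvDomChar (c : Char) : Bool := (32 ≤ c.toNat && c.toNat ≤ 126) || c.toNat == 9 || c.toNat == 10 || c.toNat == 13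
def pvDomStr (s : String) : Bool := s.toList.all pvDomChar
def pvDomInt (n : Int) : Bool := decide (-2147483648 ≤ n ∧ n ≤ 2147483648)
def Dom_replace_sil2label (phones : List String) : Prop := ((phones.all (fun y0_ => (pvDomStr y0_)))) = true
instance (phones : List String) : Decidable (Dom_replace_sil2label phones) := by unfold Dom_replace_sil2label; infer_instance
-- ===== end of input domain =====

-- B replaces A's last-element-rewriting merge loop by run-length grouping: build the
-- normalized token stream once, then emit one label per maximal silence run; objective: alternative.

-- s.split('_')[0]  (split? is some since the separator is nonempty; the result list is never empty, so [0] is its head)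
def pvSplitHead (s : String) : String := ((PySem.Str.split? s "_").getD []).headD ""

-- ===== PORT A =====
-- the body of A's accumulation loop, step for step
def pvAStep (outphones : List String) (ele : String) : List String :=
  if outphones = [] then outphones ++ [ele]
  else if pvSplitHead ele = "sil" ∧ pvSplitHead (outphones.getLastD "") = "sil" then
    -- outphones[-1] = 'sil_2'  (outphones ≠ [] in this branch, so getLastD/dropLast are exact)
    outphones.dropLast ++ ["sil_2"]
  else outphones ++ [ele]

def replace_sil2label (phones : List String) : List String :=
  let phones1 := phones.map (fun xx => if xx = "sil_lang" then "" else xx)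
  let phones2 := phones1.map (fun xx => if xx = "sil_punc" then "sil_2" else xx)
  let phones3 := phones2.map (fun xx => if xx = "sil_end" then "sil_2" else xx)
  let phones4 := phones3.map (fun xx => if xx = "sil" then "sil_1" else xx)
  let phones5 := phones4.filter (fun xx => xx != "")   -- list(filter(None, phones))
  phones5.foldl pvAStep ["sil_1"]

-- ===== PORT B =====
def pvSilMap : PySem.Dict String String :=
  PySem.Dict.mk [("sil_lang", ""), ("sil_punc", "sil_2"), ("sil_end", "sil_2"), ("sil", "sil_1")]

-- _is_sil(t): t.split('_')[0] == 'sil'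
def pvIsSil (t : String) : Bool := pvSplitHead t == "sil"

-- the outer while-loop of B: each iteration consumes one maximal silence run
-- (the inner 'while j < n and is_sil' advance is takeWhile/dropWhile; 'j - i > 1' ⇔ the run
-- extends past toks[i], i.e. rest.takeWhile pvIsSil ≠ []) or one non-silence token.
def pvRunScan : List String → List String
  | [] => []
  | t :: rest =>
    if pvIsSil t then
      (if rest.takeWhile pvIsSil ≠ [] then "sil_2" else t) :: pvRunScan (rest.dropWhile pvIsSil)
    else
      t :: pvRunScan rest
termination_by ts => ts.length
decreasing_by
  · exact Nat.lt_succ_of_le (List.length_dropWhile_le _ _)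
  · simp

def replace_sil2label_alt (phones : List String) : List String :=
  let toks := phones.foldl (fun toks p =>
    let t := pvSilMap.getD p p
    if t != "" then toks ++ [t] else toks) ["sil_1"]
  pvRunScan toks

-- ===== PRECONDITION & SPEC =====
def Spec_replace_sil2label (phones : List String) (out : List String) : Prop := out = replace_sil2label_alt phones
instance (phones : List String) (out : List String) : Decidable (Spec_replace_sil2label phones out) := by unfold Spec_replace_sil2label; infer_instance

-- ===== CLAIM (what is proved, stated in full; the proofs are below) =====
def Claim_equal_replace_sil2label : Prop := ∀ (phones : List String), Dom_replace_sil2label phones → Spec_replace_sil2label phones (replace_sil2label phones)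

-- ===== LEMMAS AND PROOFS =====

-- A's four comprehensions composed pointwise are exactly B's table lookup.
theorem pvMapped_eq (x : String) :
    ((fun xx => if xx = "sil" then "sil_1" else xx) ∘
     (fun xx => if xx = "sil_end" then "sil_2" else xx) ∘
     (fun xx => if xx = "sil_punc" then "sil_2" else xx) ∘
     (fun xx => if xx = "sil_lang" then "" else xx)) x = pvSilMap.getD x x := by
  simp only [Function.comp_apply]
  by_cases h1 : x = "sil_lang"
  · subst h1; decide
  by_cases h2 : x = "sil_punc"
  · subst h2; decide
  by_cases h3 : x = "sil_end"
  · subst h3; decide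
  by_cases h4 : x = "sil"
  · subst h4; decide
  simp [pvSilMap, PySem.Dict.getD, PySem.Dict.get?, h1, h2, h3, h4,
        Ne.symm h1, Ne.symm h2, Ne.symm h3, Ne.symm h4]

-- B's token-building loop produces the seed followed by the mapped-and-filtered stream.
theorem pvToks_eq (l : List String) : ∀ (init : List String),
    l.foldl (fun toks p =>
      let t := pvSilMap.getD p p
      if t != "" then toks ++ [t] else toks) init
  = init ++ (l.map (fun p => pvSilMap.getD p p)).filter (fun x => x != "") := by
  induction l with
  | nil => intro init; simp
  | cons y ys ih =>
    intro init
    by_cases h : (pvSilMap.getD y y != "") = true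
    · simp only [List.foldl_cons, List.map_cons, List.filter_cons, h, if_pos]
      rw [ih]; simp
    · simp only [List.foldl_cons, List.map_cons, List.filter_cons, h]
      rw [ih]; simp

-- one step of pvRunScan, named for the merge lemma
def pvRunHead (s : String) (ts : List String) : List String :=
  if pvIsSil s then
    (if ts.takeWhile pvIsSil ≠ [] then "sil_2" else s) :: pvRunScan (ts.dropWhile pvIsSil)
  else s :: pvRunScan ts

theorem pvRunScan_cons (t : String) (ts : List String) :
    pvRunScan (t :: ts) = pvRunHead t ts := by
  rw [pvRunScan, pvRunHead]

-- A's merge loop over any accumulator pre ++ [s] equals pre ++ one run-grouping step on s.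
theorem pvMerge_run : ∀ (n : Nat) (ts : List String), ts.length ≤ n →
    ∀ (pre : List String) (s : String),
    ts.foldl pvAStep (pre ++ [s]) = pre ++ pvRunHead s ts := by
  intro n
  induction n with
  | zero =>
    intro ts hts pre s
    have : ts = [] := List.eq_nil_of_length_eq_zero (Nat.le_zero.mp hts)
    subst this
    simp [pvRunHead, pvRunScan]
  | succ n ih =>
    intro ts hts pre s
    match ts with
    | [] => simp [pvRunHead, pvRunScan]
    | t :: rest =>
      simp only [List.foldl_cons]
      have hne : pre ++ [s] ≠ [] := by simp
      by_cases hc : pvSplitHead t = "sil" ∧ pvSplitHead s = "sil"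
      · -- merging step: the last element becomes 'sil_2'
        have hstep : pvAStep (pre ++ [s]) t = pre ++ ["sil_2"] := by
          rw [pvAStep, if_neg hne, if_pos ⟨hc.1, by rw [List.getLastD_concat]; exact hc.2⟩,
              List.dropLast_concat]
        rw [hstep, ih rest (by simpa using Nat.le_of_succ_le_succ hts) pre "sil_2"]
        have hs : pvIsSil s = true := by simp [pvIsSil, hc.2]
        have ht : pvIsSil t = true := by simp [pvIsSil, hc.1]
        have h2 : pvIsSil "sil_2" = true := by decide
        simp [pvRunHead, hs, h2, List.takeWhile_cons_of_pos ht, List.dropWhile_cons_of_pos ht]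
      · -- appending step
        have hstep : pvAStep (pre ++ [s]) t = (pre ++ [s]) ++ [t] := by
          rw [pvAStep, if_neg hne, if_neg]
          exact fun h => hc ⟨h.1, by rw [List.getLastD_concat] at h; exact h.2⟩
        rw [hstep, ih rest (by simpa using Nat.le_of_succ_le_succ hts) (pre ++ [s]) t]
        by_cases hs : pvIsSil s = true
        · -- s is silence but t is not (else hc would hold)
          have ht : pvIsSil t = false := by
            cases h : pvIsSil t with
            | false => rfl
            | true => exact absurd ⟨by simpa [pvIsSil] using h, by simpa [pvIsSil] using hs⟩ hc
          have hTW : List.takeWhile pvIsSil (t :: rest) = [] := by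
            rw [List.takeWhile_cons_of_neg]; simp [ht]
          have hDW : List.dropWhile pvIsSil (t :: rest) = t :: rest := by
            rw [List.dropWhile_cons_of_neg]; simp [ht]
          have key : pvRunHead s (t :: rest) = s :: pvRunHead t rest := by
            rw [pvRunHead, if_pos hs, hTW, hDW, if_neg (by simp), pvRunScan_cons]
          rw [key]; simp [List.append_assoc]
        · have key : pvRunHead s (t :: rest) = s :: pvRunHead t rest := by
            rw [pvRunHead, if_neg hs, pvRunScan_cons]
          rw [key]; simp [List.append_assoc]

theorem replace_sil2label_eq (phones : List String) :
    replace_sil2label phones = replace_sil2label_alt phones := by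
  unfold replace_sil2label replace_sil2label_alt
  simp only [List.map_map]
  rw [show ((fun xx => if xx = "sil" then "sil_1" else xx) ∘
     (fun xx => if xx = "sil_end" then "sil_2" else xx) ∘
     (fun xx => if xx = "sil_punc" then "sil_2" else xx) ∘
     (fun xx => if xx = "sil_lang" then "" else xx)) = (fun x => pvSilMap.getD x x)
    from funext pvMapped_eq]
  rw [pvToks_eq phones ["sil_1"]]
  have := pvMerge_run ((phones.map (fun p => pvSilMap.getD p p)).filter (fun x => x != "")).length
    _ le_rfl [] "sil_1"
  simp only [List.nil_append] at this
  rw [this, ← pvRunScan_cons]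
  rfl

-- ===== VERDICT (by name: the statement is the Claim_ definition above) =====
theorem replace_sil2label_spec : Claim_equal_replace_sil2label := by
  intro phones _
  unfold Spec_replace_sil2label
  exact replace_sil2label_eq phones
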